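-- pv_equiv track=rewrite | github.com/Mtn2025/Voice | app/core/audio_utils.py | _linear2ulaw_sample
-- ===== SOURCE A (Python) =====
-- def _linear2ulaw_sample(pcm_val):
--     if pcm_val < 0:
--         pcm_val = -pcm_val
--         sign = 0x80
--     else:
--         sign = 0x00
--
--     pcm_val = min(pcm_val, 32635)
--     pcm_val += 0x84
--
--     exp = 7
--     for e in range(7, -1, -1):
--         if (pcm_val & (1 << (e + 3))) != 0:
--             exp = e
--             break
--
--     mantissa = (pcm_val >> (exp + 3)) & 0x0F
--     byte = (sign | (exp << 4) | mantissa)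
--     return (~byte & 0xFF)
-- ===== SOURCE B (Python) =====
-- # Classic table-driven mu-law encoder: the segment/exponent is read from a
-- # precomputed 256-entry lookup table indexed by the byte (pcm_val >> 3) & 0xFF,
-- # instead of being searched for bit by bit.
-- _EXP_LUT = [7, 0, 1, 1] + [2] * 4 + [3] * 8 + [4] * 16 + [5] * 32 + [6] * 64 + [7] * 128
--
--
-- def _linear2ulaw_sample(pcm_val):
--     if pcm_val < 0:
--         pcm_val, sign = -pcm_val, 0x80
--     else:
--         sign = 0x00
--     pcm_val = min(pcm_val, 32635) + 0x84
--     exp = _EXP_LUT[(pcm_val >> 3) & 0xFF]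
--     mantissa = (pcm_val >> (exp + 3)) & 0x0F
--     return ~(sign | (exp << 4) | mantissa) & 0xFF
-- ===== Notes on version B (the rewrite author's own statement) =====
-- stated objective: idiomatic
-- what changed: The descending 8-iteration bit-search loop is replaced by the classic table-driven mu-law encoder: the exponent is read from a precomputed 256-entry segment lookup table indexed by the byte (pcm_val >> 3) & 0xFF.
import Mathlib
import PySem

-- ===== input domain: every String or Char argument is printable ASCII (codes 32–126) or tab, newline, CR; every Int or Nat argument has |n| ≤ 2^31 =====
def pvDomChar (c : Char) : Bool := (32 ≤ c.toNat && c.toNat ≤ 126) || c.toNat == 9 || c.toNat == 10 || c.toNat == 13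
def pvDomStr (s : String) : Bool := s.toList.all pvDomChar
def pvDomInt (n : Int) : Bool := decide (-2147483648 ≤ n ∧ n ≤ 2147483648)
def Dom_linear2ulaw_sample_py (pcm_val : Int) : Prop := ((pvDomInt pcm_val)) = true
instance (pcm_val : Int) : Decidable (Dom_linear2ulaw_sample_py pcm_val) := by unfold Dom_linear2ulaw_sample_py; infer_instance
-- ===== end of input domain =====

-- B replaces A's descending bit-search loop by the classic precomputed 256-entry segment lookup table; proved equal on all inputs.


-- ===== PORT A =====
-- the `for e in range(7,-1,-1): if pcm_val & (1 << (e+3)): exp = e; break` loop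
-- (exp stays 7 when the loop finds no bit); `1 << (e+3)` as `(1:Int) <<< (e+3).toNat`
-- is exact because every e the loop visits has e + 3 ≥ 0
def pvFindExp (p : Int) : List Int → Int
  | [] => 7
  | e :: rest => if PySem.Int.band p ((1 : Int) <<< (e + 3).toNat) ≠ 0 then e else pvFindExp p rest

def linear2ulaw_sample_py (pcm_val : Int) : Int :=
  let sign : Int := if pcm_val < 0 then 0x80 else 0x00
  let pv : Int := if pcm_val < 0 then -pcm_val else pcm_val
  let p : Int := min pv 32635 + 0x84
  let exp : Int := pvFindExp p (PySem.List.pyRange 7 (-1) (-1))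
  -- `p >> (exp + 3)` as `p >>> (exp + 3).toNat`: exact since exp ∈ [0, 7]
  let mantissa : Int := PySem.Int.band (p >>> (exp + 3).toNat) 0x0F
  let byte : Int := PySem.Int.bor (PySem.Int.bor sign (exp <<< (4 : Nat))) mantissa
  PySem.Int.band (Int.not byte) 0xFF

-- ===== PORT B =====
-- Source B's module-level table `[7,0,1,1] + [2]*4 + [3]*8 + [4]*16 + [5]*32 + [6]*64 + [7]*128`
def pvExpLut : List Int :=
  [7, 0, 1, 1] ++ List.replicate 4 2 ++ List.replicate 8 3 ++ List.replicate 16 4 ++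
    List.replicate 32 5 ++ List.replicate 64 6 ++ List.replicate 128 7

def linear2ulaw_sample_py_alt (pcm_val : Int) : Int :=
  let sign : Int := if pcm_val < 0 then 0x80 else 0x00
  let pv : Int := if pcm_val < 0 then -pcm_val else pcm_val
  let p : Int := min pv 32635 + 0x84
  -- `_EXP_LUT[(p >> 3) & 0xFF]`: the index is always in [0, 255] and the table
  -- has 256 entries, so Python never raises; `.getD 0` is never the default
  let exp : Int := (PySem.List.pyGet? pvExpLut (PySem.Int.band (p >>> (3 : Nat)) 0xFF)).getD 0
  let mantissa : Int := PySem.Int.band (p >>> (exp + 3).toNat) 0x0F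
  let byte : Int := PySem.Int.bor (PySem.Int.bor sign (exp <<< (4 : Nat))) mantissa
  PySem.Int.band (Int.not byte) 0xFF

-- ===== PRECONDITION & SPEC =====
def Spec_linear2ulaw_sample_py (pcm_val : Int) (out : Int) : Prop := out = linear2ulaw_sample_py_alt pcm_val
instance (pcm_val : Int) (out : Int) : Decidable (Spec_linear2ulaw_sample_py pcm_val out) := by unfold Spec_linear2ulaw_sample_py; infer_instance

-- ===== CLAIM (what is proved, stated in full; the proofs are below) =====
def Claim_equal_linear2ulaw_sample_py : Prop := ∀ (pcm_val : Int), Dom_linear2ulaw_sample_py pcm_val → Spec_linear2ulaw_sample_py pcm_val (linear2ulaw_sample_py pcm_val)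

-- ===== LEMMAS AND PROOFS =====

-- B's exponent as a function of p, for rewriting
def pvExpB (p : Int) : Int :=
  (PySem.List.pyGet? pvExpLut (PySem.Int.band (p >>> (3 : Nat)) 0xFF)).getD 0

-- Python `pcm_val & (1 << k)` for nonnegative pcm_val tests bit k
theorem pv_band_pow_ne_zero_iff (n k : Nat) :
    (PySem.Int.band ↑n ((1 : Int) <<< k) ≠ 0) ↔ n.testBit k = true := by
  rw [show (1 : Int) <<< k = ((2 ^ k : Nat) : Int) by rw [Int.shiftLeft_eq']; push_cast; ring,
    PySem.Int.band_natCast, Nat.and_two_pow]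
  cases hb : n.testBit k <;> simp

-- the loop's result depends only on bits 3..10 of p (its list arguments lie in [0, 8))
theorem pvFindExp_congr (n m : Nat) (h : ∀ k, k < 11 → n.testBit k = m.testBit k) :
    ∀ L : List Int, (∀ e ∈ L, 0 ≤ e ∧ e < 8) → pvFindExp ↑n L = pvFindExp ↑m L := by
  intro L
  induction L with
  | nil => intro _; rfl
  | cons e rest ih =>
    intro hL
    have he := hL e (List.mem_cons_self ..)
    have hk : (e + 3).toNat < 11 := by omega
    have hcond : (PySem.Int.band ↑n ((1 : Int) <<< (e + 3).toNat) ≠ 0)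
        ↔ (PySem.Int.band ↑m ((1 : Int) <<< (e + 3).toNat) ≠ 0) := by
      rw [pv_band_pow_ne_zero_iff, pv_band_pow_ne_zero_iff, h _ hk]
    simp only [pvFindExp]
    rw [if_congr hcond rfl (ih (fun e' he' => hL e' (List.mem_cons_of_mem _ he')))]

-- B's index `(p >> 3) & 0xFF` for nonnegative p is the arithmetic byte n / 8 % 256
theorem pv_mask_eq (n : Nat) :
    PySem.Int.band ((↑n : Int) >>> (3 : Nat)) 0xFF = ↑(n / 8 % 256) := by
  rw [show ((↑n : Int) >>> (3 : Nat)) = ((n >>> 3 : Nat) : Int) from rfl,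
    show (0xFF : Int) = ((255 : Nat) : Int) by norm_num, PySem.Int.band_natCast,
    Nat.shiftRight_eq_div_pow,
    show (255 : Nat) = 2 ^ 8 - 1 by norm_num, Nat.and_two_pow_sub_one_eq_mod]

-- exhaustive check of loop = table lookup on the 11 bits both sides read
set_option maxRecDepth 10000 in
theorem pv_exp_eq_small : ∀ m : Nat, m < 2048 →
    pvFindExp ↑m (PySem.List.pyRange 7 (-1) (-1)) = pvExpB ↑m := by decide

-- loop = table lookup on every nonnegative p
theorem pv_exp_eq (p : Int) (hp : 0 ≤ p) :
    pvFindExp p (PySem.List.pyRange 7 (-1) (-1)) = pvExpB p := by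
  obtain ⟨n, rfl⟩ := Int.eq_ofNat_of_zero_le hp
  have hrange : ∀ e ∈ PySem.List.pyRange 7 (-1) (-1), (0:Int) ≤ e ∧ e < 8 := by decide
  have hbits : ∀ k, k < 11 → n.testBit k = (n % 2048).testBit k := by
    intro k hk
    rw [show (2048 : Nat) = 2 ^ 11 by norm_num, Nat.testBit_mod_two_pow]
    simp [hk]
  have hA : pvFindExp ↑n (PySem.List.pyRange 7 (-1) (-1))
      = pvFindExp ↑(n % 2048) (PySem.List.pyRange 7 (-1) (-1)) :=
    pvFindExp_congr n (n % 2048) hbits _ hrange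
  have hB : pvExpB ↑n = pvExpB ↑(n % 2048) := by
    simp only [pvExpB, pv_mask_eq]
    rw [show n / 8 % 256 = (n % 2048) / 8 % 256 by omega]
  rw [hA, hB]
  exact pv_exp_eq_small (n % 2048) (Nat.mod_lt _ (by norm_num))

-- ===== VERDICT (by name: the statement is the Claim_ definition above) =====
theorem linear2ulaw_sample_py_spec : Claim_equal_linear2ulaw_sample_py := by
  intro pcm_val _
  unfold Spec_linear2ulaw_sample_py linear2ulaw_sample_py linear2ulaw_sample_py_alt
  have hp : (0 : Int) ≤ min (if pcm_val < 0 then -pcm_val else pcm_val) 32635 + 0x84 := by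
    split <;> omega
  simp only [pv_exp_eq _ hp]
  rfl
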